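-- pv_equiv track=rewrite | github.com/spacetelescope/reftools | lib/reftools/mkimphttab.py | interpret_obsmode
-- ===== SOURCE A (Python) =====
-- def interpret_obsmode(obsmode):
--     """Convert a full observation mode string with parameterized values
--     into a string which only lists the parameterized variable names
--     without values for comparison with the observation mode strings
--     in the IMPHTTAB table.
--
--     Parameters
--     ----------
--     obsmode : str
--         Full observation mode string.
--
--     Returns
--     -------
--     omode : str
--          The OBSMODE value for each row in IMPHTTAB.
--
--     Examples
--     --------
--     >>> interpret_obsmode('acs,wfc1,mjd#52334.0000,fr853n#8158.0000')
--     'acs,wfc1,mjd#,fr853n#'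
--
--     """
--     ospl = obsmode.split(',')
--     omode = ''
--     for o in ospl:
--         if '#' in o:
--             o = o.split('#')[0] + '#'
--         omode += o + ','
--     omode = omode.rstrip(',')
--     return omode
-- ===== SOURCE B (Python) =====
-- def interpret_obsmode(obsmode):
--     """Single left-to-right character scan: copy characters, but after a hash
--     sign (within the same comma-separated token) drop everything up to the
--     next comma; finally strip trailing commas."""
--     out = []
--     in_param = False
--     for ch in obsmode:
--         if ch == ',':
--             in_param = False
--             out.append(ch)
--         elif not in_param:
--             out.append(ch)
--             if ch == '#':
--                 in_param = True
--     return ''.join(out).rstrip(',')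
-- ===== Notes on version B (the rewrite author's own statement) =====
-- stated objective: alternative
-- what changed: Replaces the split-on-comma, per-token re-split and token concatenation loop by a single character-level scan with an in-parameter flag that drops each parameter value after a hash sign until the next comma, then strips trailing commas.
import Mathlib
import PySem

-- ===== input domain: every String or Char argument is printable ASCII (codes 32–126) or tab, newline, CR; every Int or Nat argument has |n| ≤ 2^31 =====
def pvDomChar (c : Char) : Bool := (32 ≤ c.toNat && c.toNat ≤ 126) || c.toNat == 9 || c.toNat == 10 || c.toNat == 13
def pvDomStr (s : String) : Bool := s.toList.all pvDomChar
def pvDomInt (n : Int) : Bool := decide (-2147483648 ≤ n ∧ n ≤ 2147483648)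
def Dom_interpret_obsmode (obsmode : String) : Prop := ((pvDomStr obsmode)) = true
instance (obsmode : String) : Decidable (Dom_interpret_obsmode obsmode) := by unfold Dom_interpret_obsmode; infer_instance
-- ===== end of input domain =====

-- B replaces A's split/re-split/concatenate token loop by one character-level scan with a skip flag; not faster, an alternative of the same cost.

-- hand port of Python's s.rstrip(','): drop trailing ',' characters from the right;
-- exact for this call since the strip set is the single character ','.
def pyRstripComma (cs : List Char) : List Char :=
  (cs.reverse.dropWhile (fun c => c == ',')).reverse

-- ===== PORT A =====
-- body of A's 'for o in ospl' loop
def accumTokenA (omode : List Char) (o : List Char) : List Char :=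
  let o := if PySem.Chars.isIn ['#'] o
           then (PySem.Chars.splitOn o ['#']).headD [] ++ ['#']
           else o
  omode ++ o ++ [',']

def interpret_obsmode (obsmode : String) : String :=
  let ospl := PySem.Chars.splitOn obsmode.toList [',']
  let omode := ospl.foldl accumTokenA []
  String.ofList (pyRstripComma omode)

-- ===== PORT B =====
-- body of B's 'for ch in obsmode' loop: state = (out, skipping)
def stepB (st : List Char × Bool) (ch : Char) : List Char × Bool :=
  if ch == ',' then (st.1 ++ [ch], false)
  else if st.2 then st
  else (st.1 ++ [ch], ch == '#')

def interpret_obsmode_alt (obsmode : String) : String :=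
  let st := obsmode.toList.foldl stepB ([], false)
  String.ofList (pyRstripComma st.1)

-- ===== PRECONDITION & SPEC =====
def Spec_interpret_obsmode (obsmode : String) (out : String) : Prop := out = interpret_obsmode_alt obsmode
instance (obsmode : String) (out : String) : Decidable (Spec_interpret_obsmode obsmode out) := by unfold Spec_interpret_obsmode; infer_instance

-- ===== CLAIM (what is proved, stated in full; the proofs are below) =====
def Claim_equal_interpret_obsmode : Prop := ∀ (obsmode : String), Dom_interpret_obsmode obsmode → Spec_interpret_obsmode obsmode (interpret_obsmode obsmode)

-- ===== LEMMAS AND PROOFS =====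

-- the tokenization done by A's obsmode.split(c), as plain structural recursion
def tokC (c : Char) : List Char → List Char → List (List Char)
  | [], cur => [cur.reverse]
  | x :: rest, cur => if x == c then cur.reverse :: tokC c rest [] else tokC c rest (x :: cur)

-- B's scan as a pure recursion (value of the accumulated output)
def scanB : List Char → Bool → List Char
  | [], _ => []
  | x :: rest, skip =>
    if x == ',' then x :: scanB rest false
    else if skip then scanB rest skip
    else x :: scanB rest (x == '#')

-- A's per-token transform
def fA (o : List Char) : List Char :=
  if PySem.Chars.isIn ['#'] o then (PySem.Chars.splitOn o ['#']).headD [] ++ ['#'] else o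

lemma go_eq (c : Char) : ∀ (fuel : Nat) (l cur : List Char) (acc : List (List Char)),
    l.length < fuel →
    PySem.Chars.splitOn.go [c] fuel l cur acc = acc.reverse ++ tokC c l cur := by
  intro fuel
  induction fuel with
  | zero => intro l cur acc h; omega
  | succ f ih =>
    intro l cur acc h
    rw [PySem.Chars.splitOn.go.eq_def]
    cases l with
    | nil => simp [tokC]
    | cons x rest =>
      by_cases hx : x == c
      · have hcx : ([c].isPrefixOf (x :: rest)) = true := by
          simp [List.isPrefixOf]; simp [beq_iff_eq] at hx; exact hx.symm
        simp only [hcx, if_true, List.length_cons, List.length_nil, List.drop_succ_cons,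
          List.drop_zero]
        rw [ih rest [] (cur.reverse :: acc) (by simpa using Nat.lt_of_succ_lt_succ h)]
        simp [tokC, hx]
      · have hcx : ([c].isPrefixOf (x :: rest)) = false := by
          simp [List.isPrefixOf]
          simp [beq_iff_eq] at hx; exact fun e => hx e.symm
        simp only [hcx, Bool.false_eq_true, if_false]
        rw [ih rest (x :: cur) acc (by simpa using Nat.lt_of_succ_lt_succ h)]
        simp [tokC, hx]

lemma splitOn_eq_tokC (c : Char) (l : List Char) :
    PySem.Chars.splitOn l [c] = tokC c l [] := by
  unfold PySem.Chars.splitOn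
  rw [go_eq c (l.length + 1) l [] [] (by omega)]
  simp

lemma tokC_headD (c : Char) : ∀ (l cur : List Char),
    (tokC c l cur).headD [] = cur.reverse ++ l.takeWhile (fun x => !(x == c)) := by
  intro l
  induction l with
  | nil => intro cur; simp [tokC]
  | cons x rest ih =>
    intro cur
    by_cases hx : x == c
    · simp [tokC, hx, List.takeWhile]
    · have hx' : (x == c) = false := by simpa using hx
      simp only [tokC, hx', Bool.false_eq_true, if_false]
      rw [ih (x :: cur)]
      simp [List.takeWhile, hx']

lemma isIn_singleton (c : Char) (l : List Char) :
    PySem.Chars.isIn [c] l = decide (c ∈ l) := by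
  by_cases h : c ∈ l
  · rw [(PySem.Chars.isIn_iff_infix [c] l).mpr ((List.singleton_infix_iff c l).mpr h)]
    simp [h]
  · rw [(PySem.Chars.isIn_eq_false_iff [c] l).mpr
      (fun hin => h ((List.singleton_infix_iff c l).mp hin))]
    simp [h]

lemma fA_eq (o : List Char) :
    fA o = if '#' ∈ o then o.takeWhile (fun x => !(x == '#')) ++ ['#'] else o := by
  unfold fA
  rw [isIn_singleton, splitOn_eq_tokC, tokC_headD]
  by_cases h : '#' ∈ o <;> simp [h]

lemma takeWhile_append_of_exists {p : Char → Bool} : ∀ (l l' : List Char),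
    (∃ y ∈ l, p y = false) → (l ++ l').takeWhile p = l.takeWhile p := by
  intro l l' h
  induction l with
  | nil => obtain ⟨y, hy, _⟩ := h; simp at hy
  | cons x rest ih =>
    by_cases hx : p x
    · obtain ⟨y, hy, hpy⟩ := h
      have hyr : y ∈ rest := by
        rcases List.mem_cons.mp hy with rfl | hr
        · rw [hx] at hpy; cases hpy
        · exact hr
      simp [List.takeWhile, hx, ih ⟨y, hyr, hpy⟩]
    · simp [List.takeWhile, Bool.eq_false_iff.mpr hx]

lemma takeWhile_append_all {p : Char → Bool} : ∀ (l l' : List Char),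
    (∀ y ∈ l, p y = true) → (l ++ l').takeWhile p = l ++ l'.takeWhile p := by
  intro l l' h
  induction l with
  | nil => simp
  | cons x rest ih =>
    simp [h x (by simp), ih (fun y hy => h y (by simp [hy]))]

lemma accumTokenA_eq (acc o : List Char) : accumTokenA acc o = acc ++ fA o ++ [','] := rfl

lemma foldl_fA : ∀ (ts : List (List Char)) (acc : List Char),
    ts.foldl accumTokenA acc = acc ++ (ts.map (fun o => fA o ++ [','])).flatten := by
  intro ts
  induction ts with
  | nil => intro acc; simp
  | cons t rest ih =>
    intro acc
    rw [List.foldl_cons, accumTokenA_eq, ih]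
    simp

lemma key : ∀ (cs cur : List Char),
    ((tokC ',' cs cur).map (fun o => fA o ++ [','])).flatten
      = (if '#' ∈ cur
         then cur.reverse.takeWhile (fun x => !(x == '#')) ++ '#' :: scanB cs true
         else cur.reverse ++ scanB cs false) ++ [','] := by
  intro cs
  induction cs with
  | nil =>
    intro cur
    simp only [tokC, List.map_cons, List.map_nil, List.flatten_cons, List.flatten_nil,
      List.append_nil, fA_eq, scanB]
    by_cases h : '#' ∈ cur <;> simp [h, List.mem_reverse]
  | cons x rest ih =>
    intro cur
    by_cases hc : x == ','
    · have hx : x = ',' := by simpa [beq_iff_eq] using hc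
      subst hx
      simp only [tokC, beq_self_eq_true, if_true, List.map_cons, List.flatten_cons]
      rw [ih [], fA_eq]
      by_cases h : '#' ∈ cur <;> simp [h, List.mem_reverse, scanB]
    · have hc' : (x == ',') = false := by simpa using hc
      simp only [tokC, hc', Bool.false_eq_true, if_false, ih (x :: cur), scanB]
      by_cases h : '#' ∈ cur
      · have hxc : '#' ∈ x :: cur := List.mem_cons_of_mem _ h
        have htw : (cur.reverse ++ [x]).takeWhile (fun y => !(y == '#'))
            = cur.reverse.takeWhile (fun y => !(y == '#')) :=
          takeWhile_append_of_exists _ _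
            ⟨'#', by simpa [List.mem_reverse] using h, by simp⟩
        simp [hxc, h, htw]
      · by_cases hh : x == '#'
        · have hx : x = '#' := by simpa [beq_iff_eq] using hh
          subst hx
          have hxc : '#' ∈ '#' :: cur := List.mem_cons_self
          have htw : (cur.reverse ++ ['#']).takeWhile (fun y => !(y == '#'))
              = cur.reverse := by
            rw [takeWhile_append_all _ _ ?all]
            · simp
            case all =>
              intro y hy
              simp only [List.mem_reverse] at hy
              simp only [Bool.not_eq_eq_eq_not, Bool.not_true, beq_eq_false_iff_ne]
              intro e; subst e; exact h hy
          simp [hxc, h, htw]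
        · have hxc : '#' ∉ x :: cur := by
            intro hm
            rcases List.mem_cons.mp hm with e | hm'
            · exact absurd (by simp [e.symm] : (x == '#') = true) (by simpa using hh)
            · exact h hm'
          have hh' : (x == '#') = false := by simpa using hh
          simp [hxc, h, hh']

lemma foldl_scanB : ∀ (cs acc : List Char) (skip : Bool),
    (cs.foldl stepB (acc, skip)).1 = acc ++ scanB cs skip := by
  intro cs
  induction cs with
  | nil => intro acc skip; simp [scanB]
  | cons x rest ih =>
    intro acc skip
    rw [List.foldl_cons]
    by_cases hc : x == ','
    · have : stepB (acc, skip) x = (acc ++ [x], false) := by simp [stepB, hc]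
      rw [this, ih]
      simp [scanB, hc]
    · have hc' : (x == ',') = false := by simpa using hc
      cases skip with
      | true =>
        have : stepB (acc, true) x = (acc, true) := by simp [stepB, hc']
        rw [this, ih]
        simp [scanB, hc']
      | false =>
        have : stepB (acc, false) x = (acc ++ [x], x == '#') := by simp [stepB, hc']
        rw [this, ih]
        simp [scanB, hc']

lemma pyRstripComma_append_comma (l : List Char) :
    pyRstripComma (l ++ [',']) = pyRstripComma l := by
  unfold pyRstripComma
  simp

-- ===== VERDICT (by name: the statement is the Claim_ definition above) =====
theorem interpret_obsmode_spec : Claim_equal_interpret_obsmode := by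
  intro obsmode _
  show String.ofList (pyRstripComma
      ((PySem.Chars.splitOn obsmode.toList [',']).foldl accumTokenA []))
    = String.ofList (pyRstripComma (obsmode.toList.foldl stepB ([], false)).1)
  rw [splitOn_eq_tokC, foldl_fA, foldl_scanB, key]
  simp only [List.not_mem_nil, List.reverse_nil, List.nil_append, if_false]
  rw [pyRstripComma_append_comma]
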